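-- pv_equiv track=rewrite | github.com/K-ennethA/CPSC-449 | Project-2/votes.py | parse
-- ===== SOURCE A (Python) =====
-- def parse(arr):
--     #arr gets passed in format [ '[', '1', '4', ',', '6', ']' ]
--     temp = ""
--     for i in arr:
--         if i.isdigit():
--              temp = temp + i
--         elif i == ",":
--             temp = temp + ", "
--     #split string into a list of string digits
--     parsed = temp.split(", ")
--     #return the example as [ '14', '6']
--     return parsed
-- ===== SOURCE B (Python) =====
-- def parse(arr):
--     # single streaming pass: tokenize directly instead of building a joined
--     # string and splitting it
--     tokens = []
--     current = ""
--     for i in arr: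
--         if i.isdigit():
--             current += i
--         elif i == ",":
--             tokens.append(current)
--             current = ""
--     tokens.append(current)
--     return tokens
-- ===== Notes on version B (the rewrite author's own statement) =====
-- stated objective: alternative
-- what changed: B tokenizes in one streaming pass with a tokens list and a current accumulator, instead of A's building a ', '-joined string and calling split(', ') afterwards.
import Mathlib
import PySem

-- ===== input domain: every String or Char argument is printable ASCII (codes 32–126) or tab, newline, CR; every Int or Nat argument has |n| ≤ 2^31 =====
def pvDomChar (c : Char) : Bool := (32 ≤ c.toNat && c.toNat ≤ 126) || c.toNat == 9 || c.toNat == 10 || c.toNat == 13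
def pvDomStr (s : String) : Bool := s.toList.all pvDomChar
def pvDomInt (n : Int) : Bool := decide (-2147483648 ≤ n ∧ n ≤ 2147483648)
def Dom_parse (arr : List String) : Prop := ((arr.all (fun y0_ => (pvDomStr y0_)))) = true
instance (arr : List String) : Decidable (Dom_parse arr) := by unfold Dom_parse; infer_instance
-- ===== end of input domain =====

-- B replaces A's build-a-joined-string-then-split with a single streaming tokenizer pass (alternative decomposition, same cost).


-- ===== PORT A =====
def parse (arr : List String) : List String :=
  let temp := arr.foldl (fun temp i =>
    if PySem.Str.strIsdigit i then temp ++ i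
    else if i == "," then temp ++ ", " else temp) ""
  -- the separator ", " is nonempty, so split? is always `some`; the getD default is never used
  (PySem.Str.split? temp ", ").getD []

-- ===== PORT B =====
def parse_alt (arr : List String) : List String :=
  let st := arr.foldl (fun (st : List String × String) i =>
    if PySem.Str.strIsdigit i then (st.1, st.2 ++ i)
    else if i == "," then (st.1 ++ [st.2], "") else st) ([], "")
  st.1 ++ [st.2]

-- ===== PRECONDITION & SPEC =====
def Spec_parse (arr : List String) (out : List String) : Prop := out = parse_alt arr
instance (arr : List String) (out : List String) : Decidable (Spec_parse arr out) := by unfold Spec_parse; infer_instance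

-- ===== CLAIM (what is proved, stated in full; the proofs are below) =====
def Claim_equal_parse : Prop := ∀ (arr : List String), Dom_parse arr → Spec_parse arr (parse arr)

-- ===== LEMMAS AND PROOFS =====

-- the separator ", " as a char list
def pvSep : List Char := [',', ' ']

-- splitOn.go never finds the separator inside a comma-free remainder
lemma go_no_sep (fuel : Nat) : ∀ (l cur : List Char) (acc : List (List Char)), ',' ∉ l →
    PySem.Chars.splitOn.go pvSep fuel l cur acc = ((cur.reverse ++ l) :: acc).reverse := by
  induction fuel with
  | zero => intro l cur acc _; simp [PySem.Chars.splitOn.go]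
  | succ f ih =>
    intro l cur acc h
    cases l with
    | nil => simp [PySem.Chars.splitOn.go]
    | cons c rest =>
      have hc : c ≠ ',' := fun hcc => h (hcc ▸ List.mem_cons_self)
      have hpre : pvSep.isPrefixOf (c :: rest) = false := by
        simp [pvSep, List.isPrefixOf]
        intro hcc; exact absurd hcc.symm hc
      simp only [PySem.Chars.splitOn.go, hpre]
      rw [ih rest (c :: cur) acc (fun hm => h (List.mem_cons_of_mem _ hm))]
      simp

-- consuming one comma-free piece followed by the separator
lemma go_piece (p : List Char) : ∀ (f : Nat) (rest cur : List Char) (acc : List (List Char)), ',' ∉ p →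
    PySem.Chars.splitOn.go pvSep (p.length + 1 + f) (p ++ pvSep ++ rest) cur acc
      = PySem.Chars.splitOn.go pvSep f rest [] ((cur.reverse ++ p) :: acc) := by
  induction p with
  | nil =>
    intro f rest cur acc _
    simp only [List.nil_append, List.length_nil, Nat.zero_add]
    rw [Nat.add_comm 1 f]
    simp [pvSep, PySem.Chars.splitOn.go, List.isPrefixOf]
  | cons c p ih =>
    intro f rest cur acc h
    have hc : c ≠ ',' := fun hcc => h (hcc ▸ List.mem_cons_self)
    have hpre : pvSep.isPrefixOf (c :: (p ++ pvSep ++ rest)) = false := by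
      simp [pvSep, List.isPrefixOf]
      intro hcc; exact absurd hcc.symm hc
    have hlen : (c :: p).length + 1 + f = (p.length + 1 + f) + 1 := by simp; omega
    rw [hlen]
    simp only [List.cons_append, PySem.Chars.splitOn.go, hpre]
    rw [ih f rest (c :: cur) acc (fun hm => h (List.mem_cons_of_mem _ hm))]
    simp

lemma join_cons (a : List Char) (l : List (List Char)) (h : l ≠ []) :
    PySem.Chars.join pvSep (a :: l) = a ++ pvSep ++ PySem.Chars.join pvSep l := by
  cases l with
  | nil => exact absurd rfl h
  | cons b t => exact PySem.Chars.join_cons_cons _ _ _ _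

-- splitting the joined comma-free pieces recovers the pieces
lemma go_join : ∀ (pieces : List (List Char)), pieces ≠ [] → (∀ p ∈ pieces, ',' ∉ p) →
    ∀ (acc : List (List Char)) (fuel : Nat), (PySem.Chars.join pvSep pieces).length ≤ fuel →
    PySem.Chars.splitOn.go pvSep fuel (PySem.Chars.join pvSep pieces) [] acc.reverse
      = acc ++ pieces := by
  intro pieces
  induction pieces with
  | nil => intro h; exact absurd rfl h
  | cons p rest ih =>
    intro _ hnc acc fuel hfuel
    cases rest with
    | nil =>
      rw [PySem.Chars.join_singleton]
      rw [go_no_sep fuel p [] acc.reverse (hnc p List.mem_cons_self)]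
      simp
    | cons q t =>
      rw [PySem.Chars.join_cons_cons] at hfuel ⊢
      have hsl : pvSep.length = 2 := rfl
      have hfe : fuel = p.length + 1 + (fuel - p.length - 1) := by
        simp only [List.length_append, hsl] at hfuel; omega
      rw [hfe, go_piece p _ _ _ _ (hnc p List.mem_cons_self)]
      have : ([] : List Char).reverse ++ p = p := by simp
      rw [this]
      have hacc : (p :: acc.reverse : List (List Char)) = (acc ++ [p]).reverse := by simp
      rw [hacc, ih (by simp) (fun x hx => hnc x (List.mem_cons_of_mem _ hx)) (acc ++ [p])
        (fuel - p.length - 1) (by simp only [List.length_append, hsl] at hfuel ⊢; omega)]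
      simp

lemma splitOn_join (pieces : List (List Char)) (h : pieces ≠ []) (hnc : ∀ p ∈ pieces, ',' ∉ p) :
    PySem.Chars.splitOn (PySem.Chars.join pvSep pieces) pvSep = pieces := by
  unfold PySem.Chars.splitOn
  have := go_join pieces h hnc [] ((PySem.Chars.join pvSep pieces).length + 1) (by omega)
  simpa using this

-- appending chars to the last piece appends them to the join
lemma join_append_last (x : List Char) : ∀ (ts : List (List Char)) (c : List Char),
    PySem.Chars.join pvSep (ts ++ [c ++ x]) = PySem.Chars.join pvSep (ts ++ [c]) ++ x := by
  intro ts
  induction ts with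
  | nil => intro c; simp [PySem.Chars.join_singleton]
  | cons t ts ih =>
    intro c
    rw [List.cons_append, List.cons_append, join_cons _ _ (by simp), join_cons _ _ (by simp), ih]
    simp

-- starting a fresh empty piece appends the separator to the join
lemma join_push_empty : ∀ (ts : List (List Char)) (c : List Char),
    PySem.Chars.join pvSep ((ts ++ [c]) ++ [[]]) = PySem.Chars.join pvSep (ts ++ [c]) ++ pvSep := by
  intro ts
  induction ts with
  | nil => intro c; simp [PySem.Chars.join_cons_cons, PySem.Chars.join_singleton]
  | cons t ts ih =>
    intro c
    rw [List.cons_append, List.cons_append, join_cons _ _ (by simp), join_cons _ _ (by simp), ih]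
    simp

lemma map_ofList_toList (l : List String) : l.map (String.ofList ∘ String.toList) = l := by
  induction l with
  | nil => simp
  | cons a l ih => simp [ih]

-- a digit string contains no comma
lemma strIsdigit_no_comma (s : String) (h : PySem.Str.strIsdigit s = true) : ',' ∉ s.toList := by
  intro hm
  unfold PySem.Str.strIsdigit PySem.Chars.strIsdigit at h
  simp at h
  have := h.2 ',' hm
  simp [PySem.Chars.isdigit] at this

-- the loop invariant: A's accumulated string is the pvSep-join of B's tokens ++ [current],
-- and every piece is comma-free
lemma loop_inv : ∀ (arr : List String) (temp : String) (tokens : List String) (current : String),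
    temp.toList = PySem.Chars.join pvSep ((tokens ++ [current]).map String.toList) →
    (∀ t ∈ tokens ++ [current], ',' ∉ t.toList) →
    (arr.foldl (fun temp i =>
        if PySem.Str.strIsdigit i then temp ++ i
        else if i == "," then temp ++ ", " else temp) temp).toList
      = PySem.Chars.join pvSep
          (((arr.foldl (fun (st : List String × String) i =>
              if PySem.Str.strIsdigit i then (st.1, st.2 ++ i)
              else if i == "," then (st.1 ++ [st.2], "") else st) (tokens, current)).1
            ++ [(arr.foldl (fun (st : List String × String) i =>
              if PySem.Str.strIsdigit i then (st.1, st.2 ++ i)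
              else if i == "," then (st.1 ++ [st.2], "") else st) (tokens, current)).2]).map String.toList)
      ∧ (∀ t ∈ (arr.foldl (fun (st : List String × String) i =>
              if PySem.Str.strIsdigit i then (st.1, st.2 ++ i)
              else if i == "," then (st.1 ++ [st.2], "") else st) (tokens, current)).1
            ++ [(arr.foldl (fun (st : List String × String) i =>
              if PySem.Str.strIsdigit i then (st.1, st.2 ++ i)
              else if i == "," then (st.1 ++ [st.2], "") else st) (tokens, current)).2],
          ',' ∉ t.toList) := by
  intro arr
  induction arr with
  | nil => intro temp tokens current hj hnc; exact ⟨hj, hnc⟩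
  | cons i rest ih =>
    intro temp tokens current hj hnc
    simp only [List.foldl_cons]
    by_cases hd : PySem.Str.strIsdigit i = true
    · simp only [hd, if_pos]
      apply ih
      · simp only [String.toList_append, hj]
        have : ((tokens ++ [current ++ i]).map String.toList)
            = (tokens.map String.toList) ++ [current.toList ++ i.toList] := by simp
        rw [this]
        have h2 : ((tokens ++ [current]).map String.toList)
            = (tokens.map String.toList) ++ [current.toList] := by simp
        rw [h2, join_append_last]
      · intro t ht
        rcases List.mem_append.mp ht with h1 | h1
        · exact hnc t (List.mem_append.mpr (Or.inl h1))
        · simp at h1; subst h1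
          simp only [String.toList_append]
          intro hm
          rcases List.mem_append.mp hm with h2 | h2
          · exact hnc current (List.mem_append.mpr (Or.inr List.mem_cons_self)) h2
          · exact strIsdigit_no_comma i hd h2
    · simp only [hd, if_neg, Bool.not_eq_true] at *
      by_cases hcm : i = ","
      · subst hcm
        simp only [if_pos, beq_self_eq_true]
        apply ih
        · simp only [String.toList_append, hj]
          have : (((tokens ++ [current]) ++ [""]).map String.toList)
              = (((tokens.map String.toList) ++ [current.toList]) ++ [[]]) := by simp
          rw [this, join_push_empty]
          have h2 : ((tokens ++ [current]).map String.toList)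
              = (tokens.map String.toList) ++ [current.toList] := by simp
          rw [h2]
          congr 1
        · intro t ht
          rcases List.mem_append.mp ht with h1 | h1
          · exact hnc t h1
          · simp at h1; subst h1; simp
      · have hne : (i == ",") = false := by simp [hcm]
        simp only [hne, Bool.false_eq_true, if_false]
        exact ih temp tokens current hj hnc

-- ===== VERDICT (by name: the statement is the Claim_ definition above) =====
theorem parse_spec : Claim_equal_parse := by
  intro arr _
  unfold Spec_parse parse parse_alt
  have h := loop_inv arr "" [] ""
    (by simp [PySem.Chars.join_singleton]) (by intro t ht; simp at ht; subst ht; simp)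
  obtain ⟨hj, hnc⟩ := h
  set st := arr.foldl (fun (st : List String × String) i =>
      if PySem.Str.strIsdigit i then (st.1, st.2 ++ i)
      else if i == "," then (st.1 ++ [st.2], "") else st) ([], "") with hst
  simp only at hj hnc ⊢
  unfold PySem.Str.split? PySem.Chars.split?
  have hsep : (", ".toList : List Char) = pvSep := by simp [pvSep]
  rw [hsep] at *
  simp only [pvSep, List.isEmpty_cons]
  rw [show ([',', ' '] : List Char) = pvSep from rfl]
  rw [hj, splitOn_join _ (by simp) (by
    intro p hp
    simp only [List.mem_map] at hp
    obtain ⟨t, ht, rfl⟩ := hp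
    exact hnc t ht)]
  simp
  exact map_ofList_toList st.1
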